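-- pv_equiv track=rewrite | github.com/theSquaredError/reactree_webshop | reactree/src/alfred/utils.py | delete_obj_from_working_memory
-- ===== SOURCE A (Python) =====
-- import string
--
-- ALFRED_RECEP = {'ArmChair', 'Safe', 'Cart', 'Ottoman', 'Pot', 'CoffeeMachine', 'Desk', 'Cabinet', 'Pan',
--                 'Drawer', 'Sofa', 'Mug', 'StoveBurner', 'SideTable', 'Toilet', 'Bowl', 'Box', 'DiningTable',
--                 'Shelf', 'ToiletPaperHanger', 'CoffeeTable', 'Cup', 'Plate', 'Bathtub', 'Bed', 'Dresser',
--                 'Fridge', 'Microwave', 'CounterTop', 'Sink', 'GarbageCan', 'BathtubBasin', 'SinkBasin',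
--                 'HandTowelHolder', 'PaintingHanger', 'Pan', 'Pot', 'TowelHolder', 'Safe', 'LaundryHamper',
--                 'TVStand','Toaster'}
--
-- AFLRED_RECEP_MOVABLE = {'Bowl','Box','Cup','Mug','Plate','Pan','Pot'}
--
-- def natural_word_to_ithor_name(w):
--     # e.g., floor lamp -> FloorLamp
--     if w == 'CD':
--         return w
--     else:
--         return ''.join([string.capwords(x) for x in w.split()])
--
-- def delete_obj_from_working_memory(working_memory, obj_name, location):
--     obj_class = obj_name.split("(")[0]
--     obj_class = natural_word_to_ithor_name(obj_class)
--
--     if obj_class in ALFRED_RECEP: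
--         if not obj_class in AFLRED_RECEP_MOVABLE:
--             return working_memory
--
--     if obj_class not in working_memory:
--         return working_memory # error! not in working memory
--
--     is_prv_seen = False
--
--     for entry in working_memory[obj_class]:
--         if entry['id'] == obj_name:
--             is_prv_seen = True
--
--     if not is_prv_seen:
--         working_memory[obj_class].append(
--             {'id': obj_name, 'location_obj': location}
--         )
--
--     # delete target object from working memory
--     # sliced object must be deleted
--     delete_index= None
--     for i, entry in enumerate(working_memory[obj_class]):
--         if entry['id'] == obj_name:
--             is_prv_seen = True
--             delete_index = i
--     # delete list element
--     if delete_index is not None: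
--         del working_memory[obj_class][delete_index]
--     return working_memory
-- ===== SOURCE B (Python) =====
-- import string
--
-- ALFRED_RECEP = {'ArmChair', 'Safe', 'Cart', 'Ottoman', 'Pot', 'CoffeeMachine', 'Desk', 'Cabinet', 'Pan',
--                 'Drawer', 'Sofa', 'Mug', 'StoveBurner', 'SideTable', 'Toilet', 'Bowl', 'Box', 'DiningTable',
--                 'Shelf', 'ToiletPaperHanger', 'CoffeeTable', 'Cup', 'Plate', 'Bathtub', 'Bed', 'Dresser',
--                 'Fridge', 'Microwave', 'CounterTop', 'Sink', 'GarbageCan', 'BathtubBasin', 'SinkBasin',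
--                 'HandTowelHolder', 'PaintingHanger', 'Pan', 'Pot', 'TowelHolder', 'Safe', 'LaundryHamper',
--                 'TVStand', 'Toaster'}
--
-- AFLRED_RECEP_MOVABLE = {'Bowl', 'Box', 'Cup', 'Mug', 'Plate', 'Pan', 'Pot'}
--
--
-- def natural_word_to_ithor_name(w):
--     if w == 'CD':
--         return w
--     else:
--         return ''.join([string.capwords(x) for x in w.split()])
--
--
-- def _without_last_match(bucket, obj_name):
--     # rebuild the bucket functionally, skipping the first match seen from the end
--     out = []
--     dropped = False
--     for entry in reversed(bucket):
--         if not dropped and entry['id'] == obj_name: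
--             dropped = True
--         else:
--             out.append(entry)
--     out.reverse()
--     return out
--
--
-- def delete_obj_from_working_memory(working_memory, obj_name, location):
--     obj_class = natural_word_to_ithor_name(obj_name.split("(")[0])
--     if obj_class in ALFRED_RECEP and obj_class not in AFLRED_RECEP_MOVABLE:
--         return working_memory
--     # rebuild the whole mapping: the matching class (if any) gets its bucket
--     # rebuilt without the last matching entry; every other key is kept as-is.
--     return {k: (_without_last_match(v, obj_name) if k == obj_class else v)
--             for k, v in working_memory.items()}
-- ===== Notes on version B (the rewrite author's own statement) =====
-- stated objective: alternative
-- what changed: Instead of mutating the dict in place with a presence-check pass, a no-op append and a second full scan for the last matching index, B rebuilds the whole mapping functionally in one comprehension, replacing the matching class's bucket by a back-to-front rebuild that skips the last matching entry; the explicit membership test on the dict disappears (a non-matching key makes the rebuild the identity).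
import Mathlib
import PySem

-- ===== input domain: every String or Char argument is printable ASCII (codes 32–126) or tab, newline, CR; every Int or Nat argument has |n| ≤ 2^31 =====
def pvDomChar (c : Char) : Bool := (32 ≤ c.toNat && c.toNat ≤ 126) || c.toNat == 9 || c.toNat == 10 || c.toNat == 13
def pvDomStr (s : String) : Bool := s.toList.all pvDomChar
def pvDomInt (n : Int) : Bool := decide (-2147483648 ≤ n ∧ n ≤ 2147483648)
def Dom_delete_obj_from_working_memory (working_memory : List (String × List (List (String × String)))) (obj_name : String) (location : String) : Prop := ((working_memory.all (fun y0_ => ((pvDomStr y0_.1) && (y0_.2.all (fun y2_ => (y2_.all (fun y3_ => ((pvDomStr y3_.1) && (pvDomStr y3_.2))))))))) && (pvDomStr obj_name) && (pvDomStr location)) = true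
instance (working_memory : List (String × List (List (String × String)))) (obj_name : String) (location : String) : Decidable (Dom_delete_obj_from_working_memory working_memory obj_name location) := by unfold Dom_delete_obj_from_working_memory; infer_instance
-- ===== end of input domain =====

-- B rebuilds the whole mapping functionally in one pass (matching bucket rebuilt back-to-front
-- without the last matching entry; the dict membership test disappears) instead of A's in-place
-- presence pass + no-op append + last-index scan (objective: alternative).  A mutates the
-- dict/bucket in place, B builds a new dict; the equivalence proved is about the RETURN value.

-- ===== PORT A =====
-- module-level set constants (Python sets of distinct string literals)
def pvAlfredRecep : List String :=
  ["ArmChair", "Safe", "Cart", "Ottoman", "Pot", "CoffeeMachine", "Desk", "Cabinet", "Pan",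
   "Drawer", "Sofa", "Mug", "StoveBurner", "SideTable", "Toilet", "Bowl", "Box", "DiningTable",
   "Shelf", "ToiletPaperHanger", "CoffeeTable", "Cup", "Plate", "Bathtub", "Bed", "Dresser",
   "Fridge", "Microwave", "CounterTop", "Sink", "GarbageCan", "BathtubBasin", "SinkBasin",
   "HandTowelHolder", "PaintingHanger", "TowelHolder", "LaundryHamper", "TVStand", "Toaster"]

def pvAlfredRecepMovable : List String := ["Bowl", "Box", "Cup", "Mug", "Plate", "Pan", "Pot"]

-- str.capitalize(): first char titlecased, rest lowercased — exact on the ASCII domain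
def pvCapitalize (s : String) : String :=
  match s.toList with
  | [] => ""
  | c :: cs => String.ofList (PySem.Chars.upperChar c :: cs.map PySem.Chars.lowerChar)

-- string.capwords(s) = ' '.join(x.capitalize() for x in s.split())
def pvCapwords (s : String) : String :=
  PySem.Str.join " " ((PySem.Str.split₀ s).map pvCapitalize)

def natural_word_to_ithor_name (w : String) : String :=
  if w == "CD" then w
  else PySem.Str.join "" ((PySem.Str.split₀ w).map pvCapwords)

-- entry['id']; Pre_ guarantees the key is present wherever Python evaluates this, so the
-- "" default is never the value inside Pre_
def pvEntryId (e : List (String × String)) : String :=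
  PySem.Dict.getD (PySem.Dict.mk e) "id" ""

def delete_obj_from_working_memory (working_memory : List (String × List (List (String × String)))) (obj_name : String) (location : String) : List (String × List (List (String × String))) :=
  let obj_class := natural_word_to_ithor_name (((PySem.Str.split? obj_name "(").getD []).headD "")
  if pvAlfredRecep.contains obj_class && !(pvAlfredRecepMovable.contains obj_class) then
    working_memory
  else
    match PySem.Dict.get? (PySem.Dict.mk working_memory) obj_class with
    | none => working_memory
    | some bucket =>
      let is_prv_seen := bucket.foldl (fun b e => if pvEntryId e == obj_name then true else b) false
      let bucket2 := if !is_prv_seen then bucket ++ [[("id", obj_name), ("location_obj", location)]] else bucket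
      let delete_index := (PySem.List.enumerate bucket2 0).foldl
        (fun di q => if pvEntryId q.2 == obj_name then some q.1 else di) (none : Option Int)
      match delete_index with
      | none => (PySem.Dict.insert (PySem.Dict.mk working_memory) obj_class bucket2).items
      | some i => (PySem.Dict.insert (PySem.Dict.mk working_memory) obj_class (bucket2.eraseIdx i.toNat)).items

-- ===== PORT B =====
-- _without_last_match: rebuild the bucket over reversed(bucket) with an (out, dropped)
-- accumulator, skipping the first match from the end, then reverse the result
def pvWithoutLastMatch (bucket : List (List (String × String))) (o : String) : List (List (String × String)) :=
  let p := bucket.reverse.foldl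
    (fun (p : List (List (String × String)) × Bool) e =>
      if !p.2 && (pvEntryId e == o) then (p.1, true) else (p.1 ++ [e], p.2))
    ([], false)
  p.1.reverse

def delete_obj_from_working_memory_alt (working_memory : List (String × List (List (String × String)))) (obj_name : String) (location : String) : List (String × List (List (String × String))) :=
  let obj_class := natural_word_to_ithor_name (((PySem.Str.split? obj_name "(").getD []).headD "")
  if pvAlfredRecep.contains obj_class && !(pvAlfredRecepMovable.contains obj_class) then
    working_memory
  else
    -- dict comprehension: every key kept in order, the matching key's bucket rebuilt
    working_memory.map (fun p =>
      if p.1 == obj_class then (p.1, pvWithoutLastMatch p.2 obj_name) else p)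

-- ===== PRECONDITION & SPEC =====
-- Pre_ excludes (a) association lists with duplicate keys, which represent no Python dict, and
-- (b) exactly the inputs on which Python A raises KeyError: the scanned bucket contains an
-- entry without an 'id' key.  It excludes no input on which A returns.
def Pre_delete_obj_from_working_memory (working_memory : List (String × List (List (String × String)))) (obj_name : String) (location : String) : Prop :=
  (working_memory.map Prod.fst).Nodup ∧
  ((let obj_class := natural_word_to_ithor_name (((PySem.Str.split? obj_name "(").getD []).headD "")
    (pvAlfredRecep.contains obj_class && !(pvAlfredRecepMovable.contains obj_class)) = false →
    ∀ e ∈ PySem.Dict.getD (PySem.Dict.mk working_memory) obj_class [],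
      (PySem.Dict.mk e).contains "id" = true))
instance (working_memory : List (String × List (List (String × String)))) (obj_name : String) (location : String) : Decidable (Pre_delete_obj_from_working_memory working_memory obj_name location) := by unfold Pre_delete_obj_from_working_memory; infer_instance

def pvWitness_delete_obj_from_working_memory : (List (String × List (List (String × String)))) × String × String :=
  ([("Apple", [[("id", "apple(1)"), ("location_obj", "table")]])], "apple(1)", "desk")

def Spec_delete_obj_from_working_memory (working_memory : List (String × List (List (String × String)))) (obj_name : String) (location : String) (out : List (String × List (List (String × String)))) : Prop := out = delete_obj_from_working_memory_alt working_memory obj_name location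
instance (working_memory : List (String × List (List (String × String)))) (obj_name : String) (location : String) (out : List (String × List (List (String × String)))) : Decidable (Spec_delete_obj_from_working_memory working_memory obj_name location out) := by unfold Spec_delete_obj_from_working_memory; infer_instance

-- ===== CLAIM (what is proved, stated in full; the proofs are below) =====
def Claim_equal_delete_obj_from_working_memory : Prop := ∀ (working_memory : List (String × List (List (String × String)))) (obj_name : String) (location : String), Dom_delete_obj_from_working_memory working_memory obj_name location → Pre_delete_obj_from_working_memory working_memory obj_name location → Spec_delete_obj_from_working_memory working_memory obj_name location (delete_obj_from_working_memory working_memory obj_name location)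

-- ===== LEMMAS AND PROOFS =====

theorem pvWitness_ok :
    Dom_delete_obj_from_working_memory pvWitness_delete_obj_from_working_memory.1 pvWitness_delete_obj_from_working_memory.2.1 pvWitness_delete_obj_from_working_memory.2.2 ∧
    Pre_delete_obj_from_working_memory pvWitness_delete_obj_from_working_memory.1 pvWitness_delete_obj_from_working_memory.2.1 pvWitness_delete_obj_from_working_memory.2.2 := by
  constructor <;> decide

-- A's presence loop is List.any
theorem foldl_seen (o : String) (xs : List (List (String × String))) (b : Bool) :
    xs.foldl (fun b e => if pvEntryId e == o then true else b) b
      = (b || xs.any (fun e => pvEntryId e == o)) := by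
  induction xs generalizing b with
  | nil => simp
  | cons x xs ih =>
    simp only [List.foldl_cons, List.any_cons, ih]
    by_cases h : (pvEntryId x == o) = true <;> simp [h]

-- A's last-match-index loop, characterised by the first match of the reversed list
theorem foldl_enum (o : String) (xs : List (List (String × String))) (s : Int) (a : Option Int) :
    (PySem.List.enumerate xs s).foldl (fun di q => if pvEntryId q.2 == o then some q.1 else di) a
      = (match xs.reverse.findIdx? (fun e => pvEntryId e == o) with
         | some k => some (s + ((xs.length - 1 - k : Nat) : Int))
         | none => a) := by
  induction xs generalizing s a with
  | nil => simp [PySem.List.enumerate_nil]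
  | cons x xs ih =>
    rw [PySem.List.enumerate_cons, List.foldl_cons, ih]
    have happ : (x :: xs).reverse.findIdx? (fun e => pvEntryId e == o)
        = (xs.reverse.findIdx? (fun e => pvEntryId e == o)).or
            ((([x] : List _).findIdx? (fun e => pvEntryId e == o)).map (· + xs.reverse.length)) := by
      rw [List.reverse_cons, List.findIdx?_append]
    cases hk : xs.reverse.findIdx? (fun e => pvEntryId e == o) with
    | some k =>
      have hlt : k < xs.length := by
        have := (List.findIdx?_eq_some_iff_findIdx_eq.mp hk).1
        simpa using this
      simp only [happ, hk, Option.or]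
      simp only [Option.some.injEq, List.length_cons]
      omega
    | none =>
      by_cases hx : (pvEntryId x == o) = true
      · rw [happ, hk]
        simp [List.findIdx?_cons, hx]
      · rw [happ, hk]
        simp [List.findIdx?_cons, hx]

-- once an entry has been dropped, B's rebuild loop only appends
theorem foldl_drop_true (o : String) (ys : List (List (String × String))) (acc : List (List (String × String))) :
    ys.foldl (fun (p : List (List (String × String)) × Bool) e =>
        if !p.2 && (pvEntryId e == o) then (p.1, true) else (p.1 ++ [e], p.2)) (acc, true)
      = (acc ++ ys, true) := by
  induction ys generalizing acc with
  | nil => simp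
  | cons y ys ih =>
    rw [List.foldl_cons]
    simp only [Bool.not_true, Bool.false_and, Bool.false_eq_true, if_false]
    rw [ih]; simp

-- B's rebuild loop before any drop: first match is skipped, everything else appended
theorem foldl_drop_false (o : String) (ys : List (List (String × String))) (acc : List (List (String × String))) :
    ys.foldl (fun (p : List (List (String × String)) × Bool) e =>
        if !p.2 && (pvEntryId e == o) then (p.1, true) else (p.1 ++ [e], p.2)) (acc, false)
      = (match ys.findIdx? (fun e => pvEntryId e == o) with
         | none => (acc ++ ys, false)
         | some k => (acc ++ ys.eraseIdx k, true)) := by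
  induction ys generalizing acc with
  | nil => simp
  | cons y ys ih =>
    by_cases hy : (pvEntryId y == o) = true
    · rw [List.foldl_cons]
      simp only [Bool.not_false, Bool.true_and, hy, if_true]
      rw [foldl_drop_true]
      simp [List.findIdx?_cons, hy]
    · rw [List.foldl_cons]
      simp only [Bool.not_false, Bool.true_and, hy, Bool.false_eq_true, if_false, ih,
        List.findIdx?_cons]
      cases hk : ys.findIdx? (fun e => pvEntryId e == o) <;> simp [List.eraseIdx_cons_succ]

-- reversing turns erasing index k into erasing index (length - 1 - k)
theorem erase_rev {α : Type} (l : List α) (k : Nat) (h : k < l.length) :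
    (l.reverse.eraseIdx k).reverse = l.eraseIdx (l.length - 1 - k) := by
  rw [List.eraseIdx_eq_take_drop_succ, List.eraseIdx_eq_take_drop_succ,
      List.take_reverse, List.drop_reverse, List.reverse_append, List.reverse_reverse,
      List.reverse_reverse]
  congr 1 <;> congr 1 <;> omega

-- B's bucket rebuild = erase the last matching index (or identity if no match)
theorem pvWithoutLastMatch_spec (bucket : List (List (String × String))) (o : String) :
    pvWithoutLastMatch bucket o
      = (match bucket.reverse.findIdx? (fun e => pvEntryId e == o) with
         | none => bucket
         | some k => bucket.eraseIdx (bucket.length - 1 - k)) := by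
  unfold pvWithoutLastMatch
  rw [foldl_drop_false]
  cases hk : bucket.reverse.findIdx? (fun e => pvEntryId e == o) with
  | none => simp
  | some k =>
    have hlt : k < bucket.length := by
      have := (List.findIdx?_eq_some_iff_findIdx_eq.mp hk).1
      simpa using this
    simp only [List.nil_append]
    exact erase_rev bucket k hlt

-- a key absent from the dict matches no pair of the association list
theorem get?_none_no_key (l : List (String × List (List (String × String)))) (c : String)
    (hget : (PySem.Dict.mk l).get? c = none) :
    ∀ p ∈ l, (p.1 == c) = false := by
  induction l with
  | nil => intro p hp; cases hp
  | cons q l ih =>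
    rw [PySem.Dict.get?_mk_cons] at hget
    by_cases hq : (q.1 == c) = true
    · rw [if_pos hq] at hget; cases hget
    · rw [if_neg hq] at hget
      intro p hp
      cases hp with
      | head => simpa using hq
      | tail _ hp => exact ih hget p hp

-- with unique keys, the matching pair's value is the dict lookup, so updating it by f p.2
-- is updating it by f bucket (and its key is c)
theorem map_update (l : List (String × List (List (String × String)))) (c : String)
    (bucket : List (List (String × String)))
    (f : List (List (String × String)) → List (List (String × String)))
    (hnd : (l.map Prod.fst).Nodup)
    (hget : (PySem.Dict.mk l).get? c = some bucket) :
    l.map (fun p => if p.1 == c then (p.1, f p.2) else p)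
      = l.map (fun p => if p.1 == c then (c, f bucket) else p) := by
  induction l with
  | nil => simp [PySem.Dict.get?] at hget
  | cons q l ih =>
    obtain ⟨k, v⟩ := q
    rw [PySem.Dict.get?_mk_cons] at hget
    simp only [List.map_cons, List.nodup_cons, List.mem_map] at hnd
    by_cases hk : (k == c) = true
    · have hkc : k = c := by simpa using hk
      have hv : v = bucket := by rw [if_pos hk] at hget; simpa using hget
      subst hkc; subst hv
      simp only [List.map_cons, hk, if_true]
      have htail : ∀ g : String × List (List (String × String)) →
            String × List (List (String × String)),
          l.map (fun p => if p.1 == k then g p else p) = l := by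
        intro g
        conv_rhs => rw [← List.map_id l]
        apply List.map_congr_left
        intro p hp
        have hp1 : (p.1 == k) = false := by
          simp only [beq_eq_false_iff_ne, ne_eq]
          exact fun h => hnd.1 ⟨p, hp, h⟩
        simp [hp1]
      rw [htail (fun p => (p.1, f p.2)), htail (fun _ => (k, f v))]
    · rw [if_neg hk] at hget
      simp only [List.map_cons, hk, Bool.false_eq_true, if_false]
      rw [ih hnd.2 hget]

-- the id of the fresh entry A appends
theorem pvEntryId_fresh (o loc : String) :
    pvEntryId [("id", o), ("location_obj", loc)] = o := by
  simp [pvEntryId, PySem.Dict.getD_eq_get?_getD, PySem.Dict.get?_mk_cons]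

-- ===== VERDICT (by name: the statement is the Claim_ definition above) =====
theorem delete_obj_from_working_memory_spec : Claim_equal_delete_obj_from_working_memory := by
  intro wm o loc _hdom hpre
  unfold Spec_delete_obj_from_working_memory
  unfold delete_obj_from_working_memory delete_obj_from_working_memory_alt
  simp only []
  set c := natural_word_to_ithor_name (((PySem.Str.split? o "(").getD []).headD "") with hc
  by_cases hg : (pvAlfredRecep.contains c && !(pvAlfredRecepMovable.contains c)) = true
  · rw [if_pos hg, if_pos hg]
  · rw [if_neg hg, if_neg hg]
    cases hget : PySem.Dict.get? (PySem.Dict.mk wm) c with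
    | none =>
      have h0 := get?_none_no_key wm c hget
      have hid : wm.map (fun p => if p.1 == c then (p.1, pvWithoutLastMatch p.2 o) else p) = wm := by
        conv_rhs => rw [← List.map_id wm]
        apply List.map_congr_left
        intro p hp
        simp [h0 p hp]
      rw [hid]
    | some bucket =>
      -- B side: the comprehension is an overwrite of key c with the rebuilt bucket
      rw [map_update wm c bucket (fun b => pvWithoutLastMatch b o) hpre.1 hget]
      have hcont : (PySem.Dict.mk wm).contains c = true := by
        rw [PySem.Dict.contains_eq_isSome_get?, hget]; rfl
      -- A's insert-with-present-key, as the same overwrite map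
      have hins : ∀ nb, (PySem.Dict.insert (PySem.Dict.mk wm) c nb).items
          = wm.map (fun p => if p.1 == c then (c, nb) else p) := by
        intro nb
        rw [PySem.Dict.items_insert_of_contains _ _ hcont]
      simp only [foldl_seen, Bool.false_or, foldl_enum, pvWithoutLastMatch_spec]
      by_cases hseen : bucket.any (fun e => pvEntryId e == o) = true
      · cases hfind : bucket.reverse.findIdx? (fun e => pvEntryId e == o) with
        | none =>
          rw [List.findIdx?_eq_none_iff] at hfind
          obtain ⟨e, he, hpe⟩ := List.any_eq_true.mp hseen
          have := hfind e (List.mem_reverse.mpr he)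
          simp [hpe] at this
        | some k =>
          simp only [hseen, Bool.not_true, Bool.false_eq_true, if_false, hfind, hins]
          norm_num
      · -- no matching entry: A appends a fresh entry and deletes it again; B's rebuild is the identity
        simp only [hseen, Bool.not_false, if_true]
        have hfind : (bucket ++ [[("id", o), ("location_obj", loc)]]).reverse.findIdx?
            (fun e => pvEntryId e == o) = some 0 := by
          have hrev : (bucket ++ [[("id", o), ("location_obj", loc)]]).reverse
              = [("id", o), ("location_obj", loc)] :: bucket.reverse := by simp
          rw [hrev, List.findIdx?_cons]
          simp [pvEntryId_fresh]
        have hnone : bucket.reverse.findIdx? (fun e => pvEntryId e == o) = none := by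
          rw [List.findIdx?_eq_none_iff]
          intro e he
          rw [List.any_eq_true] at hseen
          push Not at hseen
          have := hseen e (List.mem_reverse.mp he)
          simpa using this
        rw [hfind, hnone]
        simp only [List.length_append, List.length_cons, List.length_nil, Nat.zero_add]
        have hIdx : ((0 : Int) + ((bucket.length + 1 - 1 - 0 : Nat) : Int)).toNat = bucket.length := by omega
        rw [hIdx]
        have herase : (bucket ++ [[("id", o), ("location_obj", loc)]]).eraseIdx bucket.length = bucket := by
          rw [List.eraseIdx_append_of_length_le (Nat.le_refl _)]
          simp
        rw [herase, hins]
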